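-- pv_equiv track=rewrite | github.com/MrBrantCode/unitest_baseline | mut_generate/mist_train_cf/cf_22107/solution.py | sort_strings
-- ===== SOURCE A (Python) =====
-- def sort_strings(strings):
--     def merge_sort(arr):
--         if len(arr) <= 1:
--             return arr
--         mid = len(arr) // 2
--         left = merge_sort(arr[:mid])
--         right = merge_sort(arr[mid:])
--         return merge(left, right)
--
--     def merge(left, right):
--         result = []
--         i = j = 0
--         while i < len(left) and j < len(right):
--             if len(left[i]) > len(right[j]):
--                 result.append(left[i])
--                 i += 1
--             elif len(left[i]) < len(right[j]):
--                 result.append(right[j])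
--                 j += 1
--             else:
--                 if left[i] < right[j]:
--                     result.append(left[i])
--                     i += 1
--                 else:
--                     result.append(right[j])
--                     j += 1
--         while i < len(left):
--             result.append(left[i])
--             i += 1
--         while j < len(right):
--             result.append(right[j])
--             j += 1
--         return result
--
--     return merge_sort(strings)
-- ===== SOURCE B (Python) =====
-- def sort_strings(strings):
--     return sorted(strings, key=lambda s: (-len(s), s))
-- ===== Notes on version B (the rewrite author's own statement) =====
-- stated objective: simpler
-- what changed: Replaces the hand-written recursive merge sort (with its three-way merge on length/lexicographic comparisons) by a single call to the built-in stable sort with the key (-len(s), s).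
import Mathlib
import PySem

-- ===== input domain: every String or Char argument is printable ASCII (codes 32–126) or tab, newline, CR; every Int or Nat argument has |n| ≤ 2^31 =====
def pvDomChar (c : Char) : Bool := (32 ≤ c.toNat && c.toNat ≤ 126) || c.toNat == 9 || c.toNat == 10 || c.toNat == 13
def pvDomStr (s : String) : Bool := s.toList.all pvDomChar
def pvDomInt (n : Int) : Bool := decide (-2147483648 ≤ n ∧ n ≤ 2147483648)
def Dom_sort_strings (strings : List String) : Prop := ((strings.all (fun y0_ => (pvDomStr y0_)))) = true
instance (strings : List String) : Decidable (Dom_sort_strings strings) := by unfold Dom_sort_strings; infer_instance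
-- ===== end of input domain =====

-- B replaces A's hand-written recursive merge sort by one library sort with the key (-len(s), s); objective: simpler.

-- ===== PORT A =====
-- helper 'merge' of A: the index-walking while loops become structural recursion on the two lists
def pyMerge : List String → List String → List String
  | [], r => r
  | x :: ls, [] => x :: ls
  | x :: ls, y :: rs =>
    if PySem.Str.len x > PySem.Str.len y then x :: pyMerge ls (y :: rs)
    else if PySem.Str.len x < PySem.Str.len y then y :: pyMerge (x :: ls) rs
    else if x < y then x :: pyMerge ls (y :: rs)
    else y :: pyMerge (x :: ls) rs
termination_by l r => l.length + r.length

-- helper 'merge_sort' of A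
def pyMergeSort (arr : List String) : List String :=
  if h : arr.length ≤ 1 then arr
  else
    let mid := PySem.Int.floordiv ((arr.length : Int)) 2
    pyMerge (pyMergeSort (PySem.List.slice arr none (some mid)))
            (pyMergeSort (PySem.List.slice arr (some mid) none))
termination_by arr.length
decreasing_by
  · have e : PySem.Int.floordiv ((arr.length : Int)) 2 = ((arr.length/2 : Nat) : Int) := by
      exact_mod_cast PySem.Int.floordiv_natCast arr.length 2
    simp only [e, PySem.List.slice_to_natCast, List.length_take]
    omega
  · have e : PySem.Int.floordiv ((arr.length : Int)) 2 = ((arr.length/2 : Nat) : Int) := by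
      exact_mod_cast PySem.Int.floordiv_natCast arr.length 2
    simp only [e, PySem.List.slice_from_natCast, List.length_drop]
    omega

def sort_strings (strings : List String) : List String := pyMergeSort strings

-- ===== PORT B =====
def sort_strings_alt (strings : List String) : List String :=
  PySem.List.sorted2 strings (fun s => -(PySem.Str.len s)) (fun s => s)

-- ===== PRECONDITION & SPEC =====
def Spec_sort_strings (strings : List String) (out : List String) : Prop := out = sort_strings_alt strings
instance (strings : List String) (out : List String) : Decidable (Spec_sort_strings strings out) := by unfold Spec_sort_strings; infer_instance

-- ===== CLAIM (what is proved, stated in full; the proofs are below) =====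
def Claim_equal_sort_strings : Prop := ∀ (strings : List String), Dom_sort_strings strings → Spec_sort_strings strings (sort_strings strings)

-- ===== LEMMAS AND PROOFS =====

-- the sort key both programs realise: length descending, then lexicographic ascending
def pvKey (s : String) : Lex (Int × String) := toLex (-(PySem.Str.len s), s)

theorem pvKey_inj : Function.Injective pvKey := by
  intro a b h
  have h2 : (ofLex (pvKey a)).2 = (ofLex (pvKey b)).2 := by rw [h]
  simpa [pvKey] using h2

theorem pyMerge_perm (l r : List String) : (pyMerge l r).Perm (l ++ r) := by
  fun_induction pyMerge with
  | case1 r => simp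
  | case2 x ls => simp
  | case3 x ls y rs h ih => simpa using ih.cons x
  | case4 x ls y rs h1 h2 ih =>
      exact (ih.cons y).trans (List.perm_middle (a := y) (l₁ := x :: ls) (l₂ := rs)).symm
  | case5 x ls y rs h1 h2 h3 ih => simpa using ih.cons x
  | case6 x ls y rs h1 h2 h3 ih =>
      exact (ih.cons y).trans (List.perm_middle (a := y) (l₁ := x :: ls) (l₂ := rs)).symm

theorem pvKey_le_of_len_lt {x y : String}
    (h : PySem.Str.len y < PySem.Str.len x) : pvKey x ≤ pvKey y := by
  simp only [pvKey, Prod.Lex.toLex_le_toLex]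
  exact Or.inl (by omega)

theorem pvKey_le_of_len_eq_le {x y : String}
    (h : PySem.Str.len x = PySem.Str.len y) (h2 : x ≤ y) : pvKey x ≤ pvKey y := by
  simp only [pvKey, Prod.Lex.toLex_le_toLex]
  exact Or.inr ⟨by omega, h2⟩

theorem pyMerge_pairwise (l r : List String)
    (hl : l.Pairwise (fun a b => pvKey a ≤ pvKey b))
    (hr : r.Pairwise (fun a b => pvKey a ≤ pvKey b)) :
    (pyMerge l r).Pairwise (fun a b => pvKey a ≤ pvKey b) := by
  fun_induction pyMerge with
  | case1 r => exact hr
  | case2 x ls => exact hl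
  | case3 x ls y rs h ih =>
      rw [List.pairwise_cons] at hl ⊢
      refine ⟨?_, ih hl.2 hr⟩
      intro z hz
      rcases List.mem_append.mp ((pyMerge_perm ls (y :: rs)).mem_iff.mp hz) with hz' | hz'
      · exact hl.1 z hz'
      · rcases List.mem_cons.mp hz' with rfl | hz''
        · exact pvKey_le_of_len_lt (by omega)
        · exact le_trans (pvKey_le_of_len_lt (by omega))
            ((List.pairwise_cons.mp hr).1 z hz'')
  | case4 x ls y rs h1 h2 ih =>
      rw [List.pairwise_cons] at hr ⊢
      refine ⟨?_, ih hl hr.2⟩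
      intro z hz
      rcases List.mem_append.mp ((pyMerge_perm (x :: ls) rs).mem_iff.mp hz) with hz' | hz'
      · rcases List.mem_cons.mp hz' with rfl | hz''
        · exact pvKey_le_of_len_lt (by omega)
        · exact le_trans (pvKey_le_of_len_lt (by omega))
            ((List.pairwise_cons.mp hl).1 z hz'')
      · exact hr.1 z hz'
  | case5 x ls y rs h1 h2 h3 ih =>
      rw [List.pairwise_cons] at hl ⊢
      refine ⟨?_, ih hl.2 hr⟩
      intro z hz
      rcases List.mem_append.mp ((pyMerge_perm ls (y :: rs)).mem_iff.mp hz) with hz' | hz'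
      · exact hl.1 z hz'
      · rcases List.mem_cons.mp hz' with rfl | hz''
        · exact pvKey_le_of_len_eq_le (by omega) (le_of_lt h3)
        · exact le_trans (pvKey_le_of_len_eq_le (by omega) (le_of_lt h3))
            ((List.pairwise_cons.mp hr).1 z hz'')
  | case6 x ls y rs h1 h2 h3 ih =>
      rw [List.pairwise_cons] at hr ⊢
      refine ⟨?_, ih hl hr.2⟩
      intro z hz
      rcases List.mem_append.mp ((pyMerge_perm (x :: ls) rs).mem_iff.mp hz) with hz' | hz'
      · rcases List.mem_cons.mp hz' with rfl | hz''
        · exact pvKey_le_of_len_eq_le (by omega) (le_of_not_gt h3)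
        · exact le_trans (pvKey_le_of_len_eq_le (by omega) (le_of_not_gt h3))
            ((List.pairwise_cons.mp hl).1 z hz'')
      · exact hr.1 z hz'

theorem pyMergeSort_perm (arr : List String) : (pyMergeSort arr).Perm arr := by
  fun_induction pyMergeSort with
  | case1 arr h => exact List.Perm.refl arr
  | case2 arr h mid ih1 ih2 =>
      have e : mid = ((arr.length/2 : Nat) : Int) := by
        exact_mod_cast PySem.Int.floordiv_natCast arr.length 2
      refine (pyMerge_perm _ _).trans ((ih1.append ih2).trans ?_)
      rw [e, PySem.List.slice_to_natCast, PySem.List.slice_from_natCast,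
        List.take_append_drop]

theorem pyMergeSort_pairwise (arr : List String) :
    (pyMergeSort arr).Pairwise (fun a b => pvKey a ≤ pvKey b) := by
  fun_induction pyMergeSort with
  | case1 arr h =>
      match arr, h with
      | [], _ => simp
      | [x], _ => simp
  | case2 arr h mid ih1 ih2 => exact pyMerge_pairwise _ _ ih1 ih2

theorem alt_before_eq (a b : String) :
    (decide (-(PySem.Str.len a) < -(PySem.Str.len b)) ||
      (!decide (-(PySem.Str.len b) < -(PySem.Str.len a)) && decide (a < b))) =
    decide (pvKey a < pvKey b) := by
  simp only [pvKey, Prod.Lex.toLex_lt_toLex]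
  rcases lt_trichotomy (PySem.Str.len a) (PySem.Str.len b) with h | h | h
  · rw [decide_eq_false (by omega : ¬(-(PySem.Str.len a) < -(PySem.Str.len b))),
      decide_eq_true (by omega : -(PySem.Str.len b) < -(PySem.Str.len a)),
      decide_eq_false (show ¬(-(PySem.Str.len a) < -(PySem.Str.len b) ∨
        -(PySem.Str.len a) = -(PySem.Str.len b) ∧ a < b) from by
          rintro (hc | ⟨hc, -⟩) <;> omega)]
    rfl
  · rw [decide_eq_false (by omega : ¬(-(PySem.Str.len a) < -(PySem.Str.len b))),
      decide_eq_false (by omega : ¬(-(PySem.Str.len b) < -(PySem.Str.len a)))]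
    simp only [Bool.not_false, Bool.true_and, Bool.false_or]
    refine decide_eq_decide.mpr ⟨fun hc => Or.inr ⟨by omega, hc⟩, ?_⟩
    rintro (hc | ⟨-, hc⟩)
    · omega
    · exact hc
  · rw [decide_eq_true (by omega : -(PySem.Str.len a) < -(PySem.Str.len b)),
      decide_eq_true (Or.inl (by omega) : -(PySem.Str.len a) < -(PySem.Str.len b) ∨
        -(PySem.Str.len a) = -(PySem.Str.len b) ∧ a < b)]
    rfl

theorem alt_eq_sorted (l : List String) :
    sort_strings_alt l = PySem.List.sorted l pvKey := by
  rw [sort_strings_alt, PySem.List.sorted_eq_foldl_insertBy, PySem.List.sorted2]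
  simp only []
  congr 1
  funext acc x
  congr 1
  funext a b
  exact alt_before_eq a b

theorem alt_pairwise (l : List String) :
    (sort_strings_alt l).Pairwise (fun a b => pvKey a ≤ pvKey b) := by
  rw [alt_eq_sorted]
  exact PySem.List.sorted_pairwise l pvKey

-- ===== VERDICT (by name: the statement is the Claim_ definition above) =====
theorem sort_strings_spec : Claim_equal_sort_strings := by
  intro strings _
  unfold Spec_sort_strings sort_strings
  exact PySem.List.eq_of_perm_of_pairwise_le_of_injective pvKey pvKey_inj
    ((pyMergeSort_perm strings).trans ((PySem.List.sorted2_perm strings _ _ false).symm))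
    (pyMergeSort_pairwise strings) (alt_pairwise strings)
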